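-- pv_equiv track=rewrite | github.com/arne-cl/fosay | src/core/models/lang.py | remove_contr
-- ===== SOURCE A (Python) =====
-- def remove_contr(s, contr):
--     ss = [s]
--     for old, news in contr:
--         for i in range(len(ss)):
--             temp = ss[0]
--             del ss[0]
--             if temp.find(old) != -1:
--                 for new in news:
--                     ss.append(temp.replace(old, new))
--             else:
--                 ss.append(temp)
--     return ss
-- ===== SOURCE B (Python) =====
-- def remove_contr(s, contr):
--     if not contr:
--         return [s]
--     (old, news), rest = contr[0], contr[1:]
--     if old in s:
--         out = []
--         for new in news:
--             out.extend(remove_contr(s.replace(old, new), rest))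
--         return out
--     return remove_contr(s, rest)
-- ===== Notes on version B (the rewrite author's own statement) =====
-- stated objective: alternative
-- what changed: Replaces the in-place BFS queue (pop-front/append with an index loop per contraction) by a direct recursion over the contraction list that concatenates the expansions of each replacement's subtree; same output, same order.
import Mathlib
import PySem

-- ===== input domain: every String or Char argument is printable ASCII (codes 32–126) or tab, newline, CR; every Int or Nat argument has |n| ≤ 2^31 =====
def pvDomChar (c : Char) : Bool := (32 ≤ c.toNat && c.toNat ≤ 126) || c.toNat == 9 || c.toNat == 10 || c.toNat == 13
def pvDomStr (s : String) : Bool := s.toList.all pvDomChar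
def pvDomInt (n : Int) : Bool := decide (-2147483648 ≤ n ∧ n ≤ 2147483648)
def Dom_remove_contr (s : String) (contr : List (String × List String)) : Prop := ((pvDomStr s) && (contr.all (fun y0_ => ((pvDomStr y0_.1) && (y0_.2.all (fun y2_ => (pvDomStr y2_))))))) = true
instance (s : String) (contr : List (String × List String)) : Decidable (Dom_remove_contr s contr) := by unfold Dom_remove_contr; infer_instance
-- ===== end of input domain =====

-- B replaces A's in-place BFS queue by a direct recursion over the contraction list (alternative decomposition, same cost and output order).


-- ===== PORT A =====
-- inner 'for i in range(len(ss))' loop: each iteration pops ss[0] and appends its expansion.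
-- The '[] => []' arm is unreachable (the loop runs exactly len(ss) times), matching that Python never hits ss[0] on an empty list here.
def pvLoopA : Nat → List String → String → List String → List String
  | 0, ss, _, _ => ss
  | Nat.succ n, ss, old, news =>
    match ss with
    | [] => []
    | temp :: rest =>
      pvLoopA n
        (if PySem.Str.find temp old ≠ -1 then rest ++ news.map (fun new => PySem.Str.replace temp old new)
         else rest ++ [temp]) old news

def remove_contr (s : String) (contr : List (String × List String)) : List String :=
  contr.foldl (fun ss p => pvLoopA ss.length ss p.1 p.2) [s]

-- ===== PORT B =====
def remove_contr_alt (s : String) (contr : List (String × List String)) : List String :=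
  match contr with
  | [] => [s]
  | (old, news) :: rest =>
    if PySem.Str.isIn old s then
      news.flatMap (fun new => remove_contr_alt (PySem.Str.replace s old new) rest)
    else
      remove_contr_alt s rest

-- ===== PRECONDITION & SPEC =====
def Spec_remove_contr (s : String) (contr : List (String × List String)) (out : List String) : Prop := out = remove_contr_alt s contr
instance (s : String) (contr : List (String × List String)) (out : List String) : Decidable (Spec_remove_contr s contr out) := by unfold Spec_remove_contr; infer_instance

-- ===== CLAIM (what is proved, stated in full; the proofs are below) =====
def Claim_equal_remove_contr : Prop := ∀ (s : String) (contr : List (String × List String)), Dom_remove_contr s contr → Spec_remove_contr s contr (remove_contr s contr)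

-- ===== LEMMAS AND PROOFS =====

-- one step's expansion of a single queue element
def pvExp (old : String) (news : List String) (t : String) : List String :=
  if PySem.Str.find t old ≠ -1 then news.map (fun new => PySem.Str.replace t old new) else [t]

-- the inner loop processes exactly the original ss.length front elements, moving each one's expansion to the back
theorem pvLoopA_eq (old : String) (news : List String) :
    ∀ (ss acc : List String),
      pvLoopA ss.length (ss ++ acc) old news = acc ++ ss.flatMap (pvExp old news) := by
  intro ss
  induction ss with
  | nil => intro acc; simp [pvLoopA]
  | cons t ss ih =>
    intro acc
    simp only [List.length_cons, List.cons_append, pvLoopA]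
    split_ifs with h
    · rw [List.append_assoc, ih, List.flatMap_cons, pvExp, if_pos h, List.append_assoc]
    · rw [List.append_assoc, ih, List.flatMap_cons, pvExp, if_neg h, List.append_assoc]

-- one A-step on one element equals one unfolding of B
theorem pvExp_step (old : String) (news : List String)
    (rest : List (String × List String)) (t : String) :
    (pvExp old news t).flatMap (fun u => remove_contr_alt u rest)
      = remove_contr_alt t ((old, news) :: rest) := by
  have hiff : (PySem.Str.isIn old t = true) ↔ (PySem.Str.find t old ≠ -1) := by
    simp only [PySem.Str.find_eq, PySem.Str.isIn_eq]
    rw [PySem.Chars.find_ne_neg_one_iff]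
    exact PySem.Chars.isIn_iff_infix _ _
  by_cases h : PySem.Str.isIn old t = true
  · rw [pvExp, if_pos (hiff.mp h)]
    show _ = remove_contr_alt t ((old, news) :: rest)
    rw [remove_contr_alt, if_pos h, List.flatMap_map]
  · rw [pvExp, if_neg (fun hf => h (hiff.mpr hf))]
    show [t].flatMap (fun u => remove_contr_alt u rest) = _
    rw [remove_contr_alt, if_neg h, List.flatMap_singleton]

-- the whole A fold over the contraction list, from any queue
theorem pvFold_eq (contr : List (String × List String)) :
    ∀ (ss : List String),
      contr.foldl (fun ss p => pvLoopA ss.length ss p.1 p.2) ss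
        = ss.flatMap (fun t => remove_contr_alt t contr) := by
  induction contr with
  | nil => intro ss; simp [remove_contr_alt]
  | cons p rest ih =>
    intro ss
    obtain ⟨old, news⟩ := p
    simp only [List.foldl_cons]
    have h1 : pvLoopA ss.length ss old news = ss.flatMap (pvExp old news) := by
      simpa using pvLoopA_eq old news ss []
    rw [h1, ih, List.flatMap_assoc]
    exact List.flatMap_congr (fun t _ => pvExp_step old news rest t)

-- ===== VERDICT (by name: the statement is the Claim_ definition above) =====
theorem remove_contr_spec : Claim_equal_remove_contr := by
  intro s contr _
  unfold Spec_remove_contr remove_contr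
  rw [pvFold_eq]
  simp
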